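-- pv_equiv track=rewrite | github.com/SYED-MHAMIL/DSA | leetcodeproblem/contains_duplicate.py | contain_duplicate
-- ===== SOURCE A (Python) =====
-- def contain_duplicate(arr):
--     hash_set = set()
--     for i in range(len(arr)):
--         if arr[i] in hash_set:
--            return True
--         else:
--             hash_set.add(arr[i])
--     return False
-- ===== SOURCE B (Python) =====
-- def contain_duplicate(arr):
--     return len(set(arr)) != len(arr)
-- ===== Notes on version B (the rewrite author's own statement) =====
-- stated objective: idiomatic
-- what changed: Replaces the early-exiting index loop with a membership test per element by a single cardinality comparison: len(set(arr)) != len(arr).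
import Mathlib
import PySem

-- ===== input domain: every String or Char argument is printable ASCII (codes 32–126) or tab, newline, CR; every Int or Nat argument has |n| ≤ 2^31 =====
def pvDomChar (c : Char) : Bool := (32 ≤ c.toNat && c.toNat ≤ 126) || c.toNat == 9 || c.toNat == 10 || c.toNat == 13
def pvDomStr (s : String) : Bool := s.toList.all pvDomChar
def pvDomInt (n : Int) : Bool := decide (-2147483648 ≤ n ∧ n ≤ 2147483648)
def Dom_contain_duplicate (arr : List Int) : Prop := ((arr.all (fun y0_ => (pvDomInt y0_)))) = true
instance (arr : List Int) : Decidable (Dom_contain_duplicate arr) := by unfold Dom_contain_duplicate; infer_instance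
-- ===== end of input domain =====

-- ===== PORT A =====
-- A walks the list keeping a set of seen elements and returns True on the first repeat.
def contain_duplicate_aux (xs : List Int) (hash_set : PySem.Set Int) : Bool :=
  match xs with
  | [] => false
  | x :: rest =>
    if PySem.Set.contains hash_set x then true
    else contain_duplicate_aux rest (PySem.Set.add hash_set x)

def contain_duplicate (arr : List Int) : Bool :=
  contain_duplicate_aux arr PySem.Set.empty

-- ===== PORT B =====
-- B: len(set(arr)) != len(arr)
def contain_duplicate_alt (arr : List Int) : Bool :=
  decide ((PySem.Set.ofList arr).length ≠ arr.length)

-- ===== PRECONDITION & SPEC =====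
def Spec_contain_duplicate (arr : List Int) (out : Bool) : Prop := out = contain_duplicate_alt arr
instance (arr : List Int) (out : Bool) : Decidable (Spec_contain_duplicate arr out) := by unfold Spec_contain_duplicate; infer_instance

-- ===== CLAIM (what is proved, stated in full; the proofs are below) =====
def Claim_equal_contain_duplicate : Prop := ∀ (arr : List Int), Dom_contain_duplicate arr → Spec_contain_duplicate arr (contain_duplicate arr)

-- ===== LEMMAS AND PROOFS =====

theorem length_update_le (xs : List Int) (s : PySem.Set Int) :
    (PySem.Set.update s xs).length ≤ s.length + xs.length := by
  induction xs generalizing s with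
  | nil => simp [PySem.Set.update_nil]
  | cons x rest ih =>
    rw [PySem.Set.update_cons]
    have h1 : (PySem.Set.add s x).length ≤ s.length + 1 := by
      rw [PySem.Set.add_eq_ite]
      split <;> simp
    calc (PySem.Set.update (PySem.Set.add s x) rest).length
        ≤ (PySem.Set.add s x).length + rest.length := ih _
      _ ≤ s.length + 1 + rest.length := by omega
      _ = s.length + (x :: rest).length := by simp; omega

theorem aux_eq (xs : List Int) (s : PySem.Set Int) :
    contain_duplicate_aux xs s
      = decide ((PySem.Set.update s xs).length ≠ s.length + xs.length) := by
  induction xs generalizing s with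
  | nil => simp [contain_duplicate_aux, PySem.Set.update_nil]
  | cons x rest ih =>
    rw [contain_duplicate_aux, PySem.Set.update_cons, PySem.Set.add_eq_ite]
    by_cases hx : x ∈ s
    · simp only [hx, if_pos, PySem.Set.contains]
      have := length_update_le rest s
      simp only [List.contains_eq_mem, hx, decide_true, if_true,
        List.length_cons]
      symm
      simpa using by omega
    · simp only [PySem.Set.contains, List.contains_eq_mem, hx,
        decide_false, if_false, Bool.false_eq_true]
      rw [ih]
      simp [List.length_append]
      constructor <;> intro h <;> omega

-- ===== VERDICT (by name: the statement is the Claim_ definition above) =====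
theorem contain_duplicate_spec : Claim_equal_contain_duplicate := by
  intro arr _
  show contain_duplicate arr = contain_duplicate_alt arr
  rw [contain_duplicate, contain_duplicate_alt, aux_eq, PySem.Set.update_empty]
  simp
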